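-- pv_equiv track=rewrite | github.com/ennisstephen/AoC | DAY_8/question_8_2.py | get_values_as_dict
-- ===== SOURCE A (Python) =====
-- def get_values_as_dict(file_parsed):
--     dict_of_values = {}
--     current_key = ""
--     for i in range(1, len(file_parsed)):
--         if i % 3 == 1:
--             dict_of_values[file_parsed[i]] = []
--             current_key = file_parsed[i]
--         else:
--             dict_of_values[current_key].append(file_parsed[i])
--     return dict_of_values
-- ===== SOURCE B (Python) =====
-- def get_values_as_dict(file_parsed):
--     d = {}
--     for i in range(1, len(file_parsed), 3):
--         d[file_parsed[i]] = file_parsed[i + 1:i + 3]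
--     return d
-- ===== Notes on version B (the rewrite author's own statement) =====
-- stated objective: simpler
-- what changed: B iterates in blocks of three via range(1, n, 3) and assigns each key its whole value list with one slice, removing A's i % 3 branch, the current_key state and the per-element append.
import Mathlib
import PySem

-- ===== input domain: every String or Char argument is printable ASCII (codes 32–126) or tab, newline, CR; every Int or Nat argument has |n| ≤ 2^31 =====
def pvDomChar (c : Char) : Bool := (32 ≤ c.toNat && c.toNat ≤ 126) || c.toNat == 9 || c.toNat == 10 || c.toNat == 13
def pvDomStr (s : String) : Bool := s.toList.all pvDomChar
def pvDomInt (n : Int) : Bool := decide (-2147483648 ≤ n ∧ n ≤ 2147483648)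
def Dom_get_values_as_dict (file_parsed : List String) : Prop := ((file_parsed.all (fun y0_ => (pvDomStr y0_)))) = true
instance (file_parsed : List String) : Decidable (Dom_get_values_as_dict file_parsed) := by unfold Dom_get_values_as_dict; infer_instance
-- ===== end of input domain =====

-- B replaces A's index loop with a `current_key` state and an `i % 3` branch by
-- consuming the tail of the list in blocks of three, giving each block head its
-- whole value list at once (objective: simpler).

-- ===== PORT A =====
-- one iteration of A's `for i in range(1, len(file_parsed))` loop; state = (dict, current_key)
def gvadStep (fp : List String) (st : PySem.Dict String (List String) × String) (i : Int) :
    PySem.Dict String (List String) × String :=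
  if PySem.Int.mod i 3 == 1 then
    ((st.1.insert (PySem.List.pyGetD fp i "") []), PySem.List.pyGetD fp i "")
  else
    ((st.1.modify st.2 [] (fun v => v ++ [PySem.List.pyGetD fp i ""])), st.2)

def get_values_as_dict (file_parsed : List String) : List (String × List String) :=
  (((PySem.List.pyRange 1 (file_parsed.length : Int) 1).foldl (gvadStep file_parsed)
      (PySem.Dict.empty, "")).1).items

-- ===== PORT B =====
-- one iteration of Source B's `for i in range(1, len(file_parsed), 3)` loop:
-- d[file_parsed[i]] = file_parsed[i+1:i+3]
def gvadStepB (fp : List String) (d : PySem.Dict String (List String)) (i : Int) :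
    PySem.Dict String (List String) :=
  d.insert (PySem.List.pyGetD fp i "") (PySem.List.slice fp (some (i + 1)) (some (i + 3)))

def get_values_as_dict_alt (file_parsed : List String) : List (String × List String) :=
  ((PySem.List.pyRange 1 (file_parsed.length : Int) 3).foldl (gvadStepB file_parsed)
      PySem.Dict.empty).items

-- ===== PRECONDITION & SPEC =====
def Spec_get_values_as_dict (file_parsed : List String) (out : List (String × List String)) : Prop := out = get_values_as_dict_alt file_parsed
instance (file_parsed : List String) (out : List (String × List String)) : Decidable (Spec_get_values_as_dict file_parsed out) := by unfold Spec_get_values_as_dict; infer_instance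

-- ===== CLAIM (what is proved, stated in full; the proofs are below) =====
def Claim_equal_get_values_as_dict : Prop := ∀ (file_parsed : List String), Dom_get_values_as_dict file_parsed → Spec_get_values_as_dict file_parsed (get_values_as_dict file_parsed)

-- ===== LEMMAS AND PROOFS =====

-- common reference shape both loops are reduced to: blocks of three, head = key, tail = values
def gvadBlocks : List String → PySem.Dict String (List String) → PySem.Dict String (List String)
  | [], d => d
  | k :: rest, d => gvadBlocks (rest.drop 2) (d.insert k (rest.take 2))
termination_by l _ => l.length
decreasing_by simp

-- overwriting the same key twice keeps only the second value
theorem gvad_insert_insert {κ ν : Type} [BEq κ] [LawfulBEq κ]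
    (d : PySem.Dict κ ν) (k : κ) (v w : ν) :
    (d.insert k v).insert k w = d.insert k w := by
  unfold PySem.Dict.insert PySem.Dict.contains
  by_cases h : d.items.any (fun p => p.1 == k)
  · simp only [h, if_pos]
    simp only [List.any_map]
    have h2 : (d.items.any ((fun p => p.1 == k) ∘ fun p => if (p.1 == k) = true then (k, v) else p)) = true := by
      rcases List.any_eq_true.mp h with ⟨p, hp, hpk⟩
      exact List.any_eq_true.mpr ⟨p, hp, by simp at hpk ⊢; simp [hpk]⟩
    simp only [h2, if_pos, List.map_map]
    congr 1
    apply List.map_congr_left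
    intro p _
    by_cases hpk : (p.1 == k) = true <;> simp [hpk]
  · simp only [h]
    simp only [Bool.false_eq_true, if_neg, not_false_iff]
    have h2 : ((d.items ++ [(k, v)]).any fun p => p.1 == k) = true := by
      simp
    simp only [h2, if_pos, List.map_append]
    have e1 : d.items.map (fun p => if (p.1 == k) = true then (k, w) else p) = d.items := by
      conv_rhs => rw [← List.map_id d.items]
      apply List.map_congr_left
      intro p hp
      have : ¬ (p.1 == k) = true := fun hc => h (List.any_eq_true.mpr ⟨p, hp, hc⟩)
      simp [this]
    have e2 : List.map (fun p => if (p.1 == k) = true then (k, w) else p) [(k, v)] = [(k, w)] := by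
      simp
    rw [e1, e2]

-- indexing the original list inside the loop = indexing the remaining suffix
theorem gvad_getD_drop (fp l : List String) (i j : Nat) (h : fp.drop i = l) :
    PySem.List.pyGetD fp ((i : Int) + (j : Int)) "" = l.getD j "" := by
  have : ((i : Int) + (j : Int)) = ((i + j : Nat) : Int) := by push_cast; ring
  rw [this, PySem.List.pyGetD_natCast]
  subst h
  simp [List.getD, List.getElem?_drop]

-- step-3 ranges: empty and cons forms
theorem gvad_range3_nil (a b : Int) (h : b ≤ a) : PySem.List.pyRange a b 3 = [] := by
  rw [PySem.List.pyRange_of_pos a b (by norm_num)]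
  simp [show ¬ a < b by omega]

theorem gvad_range3_cons (a b : Int) (h : a < b) :
    PySem.List.pyRange a b 3 = a :: PySem.List.pyRange (a + 3) b 3 := by
  rw [PySem.List.pyRange_of_pos a b (by norm_num), PySem.List.pyRange_of_pos (a + 3) b (by norm_num)]
  by_cases h3 : a + 3 < b
  · have e1 : (if a < b then ((b - a + 3 - 1) / 3).toNat else 0)
        = ((b - (a + 3) + 3 - 1) / 3).toNat + 1 := by
      simp only [h, if_pos]
      omega
    rw [e1, List.range_succ_eq_map]
    simp only [h3, if_pos, List.map_cons, List.map_map]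
    congr 1
    · norm_num
    · apply List.map_congr_left
      intro p _
      simp [Nat.succ_eq_add_one]
      push_cast
      ring
  · have e1 : (if a < b then ((b - a + 3 - 1) / 3).toNat else 0) = 1 := by
      simp only [h, if_pos]
      omega
    rw [e1]
    simp [show ¬ a + 3 < b from h3]

-- the slice fp[i+1:i+3] is the next ≤2 elements after the key
theorem gvad_slice (fp : List String) (i : Nat) (k : String) (rest : List String)
    (h : fp.drop i = k :: rest) :
    PySem.List.slice fp (some ((i : Int) + 1)) (some ((i : Int) + 3)) = rest.take 2 := by
  have hi : i < fp.length := by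
    have := congrArg List.length h
    simp [List.length_drop] at this
    omega
  have hrest : fp.drop (i + 1) = rest := by
    have h1 : (fp.drop i).drop 1 = rest := by rw [h]; rfl
    rwa [List.drop_drop] at h1
  have hrl : rest.length = fp.length - (i + 1) := by
    have := congrArg List.length hrest
    simp [List.length_drop] at this
    omega
  simp only [PySem.List.slice, PySem.List.clampIdx]
  have c1 : ¬ ((i : Int) + 1 < 0) := by omega
  have c2 : ¬ ((i : Int) + 3 < 0) := by omega
  have e1 : min ((i : Int) + 1).toNat fp.length = i + 1 := by omega
  have e2 : min ((i : Int) + 3).toNat fp.length = min (i + 3) fp.length := by omega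
  simp only [c1, c2, if_neg, not_false_iff, e1, e2, hrest]
  have e3 : min (i + 3) fp.length - (i + 1) = min 2 rest.length := by omega
  rw [e3]
  rcases rest with _ | ⟨a, _ | ⟨b, t⟩⟩ <;> simp

-- main invariant for A: from a key index i (i % 3 = 1), A's remaining loop builds
-- the same dict as the block recursion on the remaining suffix
theorem gvad_loop (fp : List String) :
    ∀ (N : Nat) (l : List String), l.length ≤ N → ∀ (i : Nat) (d : PySem.Dict String (List String)) (ck : String),
    fp.drop i = l → i % 3 = 1 →
    ((PySem.List.pyRange (i : Int) (fp.length : Int) 1).foldl (gvadStep fp) (d, ck)).1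
      = gvadBlocks l d := by
  intro N
  induction N with
  | zero =>
    intro l hl i d ck hdrop _
    have hnil : l = [] := List.eq_nil_of_length_eq_zero (Nat.le_zero.mp hl)
    subst hnil
    have hlen : fp.length ≤ i := by
      have := congrArg List.length hdrop
      simp [List.length_drop] at this
      omega
    rw [PySem.List.pyRange_one_eq_nil (by exact_mod_cast hlen)]
    simp [gvadBlocks]
  | succ N ih =>
    intro l hl i d ck hdrop hmod
    rcases l with _ | ⟨k, _ | ⟨v1, _ | ⟨v2, rest⟩⟩⟩
    · have hlen : fp.length ≤ i := by
        have := congrArg List.length hdrop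
        simp [List.length_drop] at this
        omega
      rw [PySem.List.pyRange_one_eq_nil (by exact_mod_cast hlen)]
      simp [gvadBlocks]
    · have hlen : fp.length = i + 1 := by
        have := congrArg List.length hdrop
        simp [List.length_drop] at this
        omega
      have hk : PySem.List.pyGetD fp ((i : Int)) "" = k := by
        have := gvad_getD_drop fp [k] i 0 hdrop
        simpa using this
      have hrange : PySem.List.pyRange (i : Int) (fp.length : Int) 1 = [(i : Int)] := by
        have e : (fp.length : Int) = (i : Int) + 1 := by omega
        rw [e]; exact PySem.List.pyRange_one_singleton _
      rw [hrange]
      have hcond : ((i : Int)) % 3 = 1 := by omega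
      simp [gvadStep, PySem.Int.mod, Int.fmod_eq_emod, hcond, hk, gvadBlocks]
    · have hlen : fp.length = i + 2 := by
        have := congrArg List.length hdrop
        simp [List.length_drop] at this
        omega
      have hk : PySem.List.pyGetD fp ((i : Int)) "" = k := by
        have := gvad_getD_drop fp [k, v1] i 0 hdrop
        simpa using this
      have hv1 : PySem.List.pyGetD fp ((i : Int) + 1) "" = v1 := by
        have := gvad_getD_drop fp [k, v1] i 1 hdrop
        simpa using this
      have hrange : PySem.List.pyRange (i : Int) (fp.length : Int) 1 = [(i : Int), (i : Int) + 1] := by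
        rw [PySem.List.pyRange_one_cons (by omega), PySem.List.pyRange_one_cons (by omega),
          PySem.List.pyRange_one_eq_nil (by omega)]
      rw [hrange]
      have hm : (PySem.Int.mod (i : Int) 3 == 1) = true := by
        simp [PySem.Int.mod, Int.fmod_eq_emod]; omega
      have hm2 : (PySem.Int.mod ((i : Int) + 1) 3 == 1) = false := by
        simp [PySem.Int.mod, Int.fmod_eq_emod]; omega
      simp only [List.foldl, gvadStep, hm, hm2, if_pos, Bool.false_eq_true, if_neg, not_false_iff,
        hk, hv1]
      simp only [PySem.Dict.modify, PySem.Dict.getD_insert_self, gvad_insert_insert]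
      simp [gvadBlocks]
    · have hlen : fp.length = i + 3 + rest.length := by
        have := congrArg List.length hdrop
        simp [List.length_drop] at this
        omega
      have hk : PySem.List.pyGetD fp ((i : Int)) "" = k := by
        have := gvad_getD_drop fp (k :: v1 :: v2 :: rest) i 0 hdrop
        simpa using this
      have hv1 : PySem.List.pyGetD fp ((i : Int) + 1) "" = v1 := by
        have := gvad_getD_drop fp (k :: v1 :: v2 :: rest) i 1 hdrop
        simpa using this
      have hv2 : PySem.List.pyGetD fp ((i : Int) + 1 + 1) "" = v2 := by
        have := gvad_getD_drop fp (k :: v1 :: v2 :: rest) i 2 hdrop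
        have e : (i : Int) + 1 + 1 = (i : Int) + (2 : Nat) := by push_cast; ring
        rw [e]; simpa using this
      have hsplit : PySem.List.pyRange (i : Int) (fp.length : Int) 1
          = (i : Int) :: ((i : Int) + 1) :: ((i : Int) + 1 + 1) :: PySem.List.pyRange ((i : Int) + 1 + 1 + 1) (fp.length : Int) 1 := by
        rw [PySem.List.pyRange_one_cons (by omega), PySem.List.pyRange_one_cons (by omega),
          PySem.List.pyRange_one_cons (by omega)]
      rw [hsplit]
      have hm : (PySem.Int.mod (i : Int) 3 == 1) = true := by
        simp [PySem.Int.mod, Int.fmod_eq_emod]; omega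
      have hm2 : (PySem.Int.mod ((i : Int) + 1) 3 == 1) = false := by
        simp [PySem.Int.mod, Int.fmod_eq_emod]; omega
      have hm3 : (PySem.Int.mod ((i : Int) + 1 + 1) 3 == 1) = false := by
        simp [PySem.Int.mod, Int.fmod_eq_emod]; omega
      simp only [List.foldl, gvadStep, hm, hm2, hm3, if_pos, Bool.false_eq_true, if_neg,
        not_false_iff, hk, hv1, hv2]
      simp only [PySem.Dict.modify, PySem.Dict.getD_insert_self, gvad_insert_insert]
      have e3 : (i : Int) + 1 + 1 + 1 = ((i + 3 : Nat) : Int) := by push_cast; ring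
      rw [e3]
      rw [ih rest (by simp at hl; omega) (i + 3) _ k
        (by rw [← List.drop_drop, hdrop]; rfl) (by omega)]
      simp [gvadBlocks]

-- main invariant for B: its step-3 loop from index i is the block recursion on the suffix
theorem gvad_loopB (fp : List String) :
    ∀ (N : Nat) (l : List String), l.length ≤ N → ∀ (i : Nat) (d : PySem.Dict String (List String)),
    fp.drop i = l →
    (PySem.List.pyRange (i : Int) (fp.length : Int) 3).foldl (gvadStepB fp) d = gvadBlocks l d := by
  intro N
  induction N with
  | zero =>
    intro l hl i d hdrop
    have hnil : l = [] := List.eq_nil_of_length_eq_zero (Nat.le_zero.mp hl)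
    subst hnil
    have hlen : fp.length ≤ i := by
      have := congrArg List.length hdrop
      simp [List.length_drop] at this
      omega
    rw [gvad_range3_nil _ _ (by exact_mod_cast hlen)]
    simp [gvadBlocks]
  | succ N ih =>
    intro l hl i d hdrop
    rcases l with _ | ⟨k, rest⟩
    · have hlen : fp.length ≤ i := by
        have := congrArg List.length hdrop
        simp [List.length_drop] at this
        omega
      rw [gvad_range3_nil _ _ (by exact_mod_cast hlen)]
      simp [gvadBlocks]
    · have hi : i < fp.length := by
        have := congrArg List.length hdrop
        simp [List.length_drop] at this
        omega
      rw [gvad_range3_cons _ _ (by exact_mod_cast hi)]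
      have hk : PySem.List.pyGetD fp ((i : Int)) "" = k := by
        have := gvad_getD_drop fp (k :: rest) i 0 hdrop
        simpa using this
      have hstep : gvadStepB fp d (i : Int) = d.insert k (rest.take 2) := by
        unfold gvadStepB
        rw [hk, gvad_slice fp i k rest hdrop]
      have e3 : (i : Int) + 3 = ((i + 3 : Nat) : Int) := by push_cast; ring
      simp only [List.foldl, hstep, e3]
      rw [ih (rest.drop 2) (by simp at hl ⊢; omega) (i + 3) _
        (by rw [← List.drop_drop, hdrop]; rfl)]
      simp [gvadBlocks]

theorem get_values_as_dict_eq (fp : List String) :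
    get_values_as_dict fp = get_values_as_dict_alt fp := by
  unfold get_values_as_dict get_values_as_dict_alt
  congr 1
  have hA := gvad_loop fp (fp.drop 1).length (fp.drop 1) le_rfl 1 PySem.Dict.empty "" rfl rfl
  have hB := gvad_loopB fp (fp.drop 1).length (fp.drop 1) le_rfl 1 PySem.Dict.empty rfl
  norm_num at hA hB
  rw [hA, hB]

-- ===== VERDICT (by name: the statement is the Claim_ definition above) =====
theorem get_values_as_dict_spec : Claim_equal_get_values_as_dict := by
  intro fp _
  exact get_values_as_dict_eq fp
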